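-- pv_equiv track=rewrite | github.com/ns2pole/calculus_gacha | lib/problems/trig_exp_log_equations/convert_frac.py | process_fracs
-- ===== SOURCE A (Python) =====
-- def has_nested_frac(text, start_pos):
--     """指定位置から始まる\fracの分母や分子に\fracが含まれているかチェック"""
--     # \frac{...}{...}の構造を解析
--     depth = 0
--     brace_count = 0
--     in_numerator = True
--     numerator_start = None
--     denominator_start = None
--
--     i = start_pos + 5  # \fracの後
--     if i >= len(text) or text[i] != '{':
--         return False
--
--     # 分子の開始
--     i += 1
--     numerator_start = i
--     brace_count = 1
--
--     # 分子の終了まで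
--     while i < len(text) and brace_count > 0:
--         if text[i] == '{':
--             brace_count += 1
--         elif text[i] == '}':
--             brace_count -= 1
--         i += 1
--
--     if i >= len(text) or text[i] != '{':
--         return False
--
--     # 分母の開始
--     i += 1
--     denominator_start = i
--     brace_count = 1
--
--     # 分母の終了まで
--     while i < len(text) and brace_count > 0:
--         if text[i] == '{':
--             brace_count += 1
--         elif text[i] == '}':
--             brace_count -= 1
--         i += 1
--
--     # 分子と分母に\fracが含まれているかチェック
--     numerator_text = text[numerator_start:denominator_start-1]
--     denominator_text = text[denominator_start:i-1]
--
--     return '\\frac' in numerator_text or '\\frac' in denominator_text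
--
-- def process_fracs(text, in_superscript=False):
--     """\fracを処理"""
--     result = []
--     i = 0
--
--     while i < len(text):
--         # \fracを探す
--         if i + 4 < len(text) and text[i:i+5] == '\\frac':
--             # \fracが見つかった
--             if in_superscript:
--                 # ^や_の中の場合、ネストされた分数かチェック
--                 if has_nested_frac(text, i):
--                     # ネストされた分数の場合は\displaystyleを付けない
--                     result.append('\\frac')
--                     i += 5
--                 else:
--                     # ネストされていない場合は\displaystyleを付ける
--                     result.append('\\displaystyle\\frac')
--                     i += 5
--             else:
--                 # 通常の場合は\displaystyleを付ける
--                 result.append('\\displaystyle\\frac')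
--                 i += 5
--         else:
--             result.append(text[i])
--             i += 1
--
--     return ''.join(result)
-- ===== SOURCE B (Python) =====
-- FRAC = '\\frac'
-- DISP = '\\displaystyle\\frac'
--
-- def process_fracs(text, in_superscript=False):
--     n = len(text)
--     # one pass: matching closing brace for every '{' that has one
--     close = {}
--     stack = []
--     for p, c in enumerate(text):
--         if c == '{':
--             stack.append(p)
--         elif c == '}' and stack:
--             close[stack.pop()] = p
--     # prefix counts of '\frac' occurrence start positions
--     F = [0]
--     for p in range(n):
--         F.append(F[p] + (1 if text[p:p+5] == FRAC else 0))
--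
--     def occ_in(a, b):
--         # whether '\frac' occurs in text[a:b], from the prefix counts
--         hi = b - 4
--         return hi > a and F[hi] - F[a] > 0
--
--     def nested(i):
--         # truth value of "the \frac at i has a \frac in numerator or denominator"
--         if i + 5 >= n or text[i + 5] != '{':
--             return False
--         j = close.get(i + 5)              # closing brace of the numerator
--         if j is None or j + 1 >= n or text[j + 1] != '{':
--             return False
--         k = close.get(j + 1)              # closing brace of the denominator
--         e2 = k + 1 if k is not None else n
--         return occ_in(i + 6, j + 1) or occ_in(j + 2, e2 - 1)
--
--     out = []
--     i = 0
--     while i < n: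
--         if text[i:i+5] == FRAC:
--             out.append(FRAC if in_superscript and nested(i) else DISP)
--             i += 5
--         else:
--             out.append(text[i])
--             i += 1
--     return ''.join(out)
-- ===== Notes on version B (the rewrite author's own statement) =====
-- stated objective: alternative
-- what changed: A re-scans the braces and substrings of each \frac occurrence from scratch; B precomputes a stack-built brace-matching dict and prefix counts of '\frac' start positions in two passes and answers each nested-frac check by table lookups instead of re-scanning.
import Mathlib
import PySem

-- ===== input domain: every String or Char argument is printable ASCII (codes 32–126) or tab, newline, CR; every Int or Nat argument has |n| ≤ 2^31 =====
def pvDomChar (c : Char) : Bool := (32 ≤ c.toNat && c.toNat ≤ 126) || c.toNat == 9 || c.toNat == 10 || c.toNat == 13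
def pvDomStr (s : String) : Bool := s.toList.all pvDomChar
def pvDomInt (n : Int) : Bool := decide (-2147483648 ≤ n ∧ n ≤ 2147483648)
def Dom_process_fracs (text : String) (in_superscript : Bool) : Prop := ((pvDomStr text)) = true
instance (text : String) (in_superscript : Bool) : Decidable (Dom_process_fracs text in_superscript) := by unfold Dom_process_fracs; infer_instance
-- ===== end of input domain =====

-- B replaces A's per-occurrence brace re-scans and substring searches by a precomputed
-- brace-matching dict and prefix counts of '\frac' start positions (objective: alternative).

def pvFrac : List Char := ['\\', 'f', 'r', 'a', 'c']
def pvDisp : List Char := "\\displaystyle\\frac".toList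

-- ===== PORT A =====
-- the two identical while-loops of has_nested_frac: returns the final value of i
def pvScanA (cs : List Char) (i : Nat) (bc : Int) : Nat :=
  if h : i < cs.length ∧ 0 < bc then
    pvScanA cs (i + 1)
      (if cs.getD i ' ' = '{' then bc + 1 else if cs.getD i ' ' = '}' then bc - 1 else bc)
  else i
termination_by cs.length - i
decreasing_by omega

def pvHasNested (cs : List Char) (start_pos : Nat) : Bool :=
  let i0 := start_pos + 5
  if i0 < cs.length ∧ cs.getD i0 ' ' = '{' then
    let e1 := pvScanA cs (i0 + 1) 1
    if e1 < cs.length ∧ cs.getD e1 ' ' = '{' then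
      let e2 := pvScanA cs (e1 + 1) 1
      let num := PySem.List.slice cs (some (↑(i0 + 1))) (some (↑e1))
      let den := PySem.List.slice cs (some (↑(e1 + 1))) (some (↑(e2 - 1)))
      PySem.Chars.isIn pvFrac num || PySem.Chars.isIn pvFrac den
    else false
  else false

def pvLoopA (cs : List Char) (sup : Bool) (i : Nat) (acc : List (List Char)) : List (List Char) :=
  if _h : i < cs.length then
    if i + 4 < cs.length ∧ PySem.List.slice cs (some ↑i) (some (↑(i + 5))) = pvFrac then
      if sup then
        if pvHasNested cs i then pvLoopA cs sup (i + 5) (acc ++ [pvFrac])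
        else pvLoopA cs sup (i + 5) (acc ++ [pvDisp])
      else pvLoopA cs sup (i + 5) (acc ++ [pvDisp])
    else pvLoopA cs sup (i + 1) (acc ++ [[cs.getD i ' ']])
  else acc
termination_by cs.length - i
decreasing_by all_goals omega

def process_fracs (text : String) (in_superscript : Bool) : String :=
  String.mk (PySem.Chars.join [] (pvLoopA text.toList in_superscript 0 []))

-- ===== PORT B =====
-- one pass with a stack: matching closing brace of every '{' that has one
def pvBuildClose (cs : List Char) : PySem.Dict Int Int × List Int :=
  (PySem.List.enumerate cs 0).foldl
    (fun st pc =>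
      if pc.2 = '{' then (st.1, st.2 ++ [pc.1])
      else if pc.2 = '}' ∧ st.2 ≠ [] then (st.1.insert (st.2.getLastD 0) pc.1, st.2.dropLast)
      else st)
    (PySem.Dict.empty, [])

-- prefix counts of positions where '\frac' starts
def pvBuildF (cs : List Char) : List Int :=
  (List.range cs.length).foldl
    (fun F p =>
      F ++ [F.getD p 0 + (if PySem.List.slice cs (some ↑p) (some (↑(p + 5))) = pvFrac then 1 else 0)])
    [0]

def pvOccIn (F : List Int) (a b : Nat) : Bool :=
  decide (a < b - 4 ∧ 0 < F.getD (b - 4) 0 - F.getD a 0)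

def pvNested (cs : List Char) (close : PySem.Dict Int Int) (F : List Int) (i : Nat) : Bool :=
  let n := cs.length
  if i + 5 < n ∧ cs.getD (i + 5) ' ' = '{' then
    match close.get? ↑(i + 5) with
    | none => false
    | some j' =>
      let j := j'.toNat
      if j + 1 < n ∧ cs.getD (j + 1) ' ' = '{' then
        let e2 : Nat :=
          match close.get? ↑(j + 1) with
          | some k => k.toNat + 1
          | none => n
        pvOccIn F (i + 6) (j + 1) || pvOccIn F (j + 2) (e2 - 1)
      else false
  else false

def pvLoopB (cs : List Char) (sup : Bool) (close : PySem.Dict Int Int) (F : List Int)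
    (i : Nat) (out : List (List Char)) : List (List Char) :=
  if _h : i < cs.length then
    if PySem.List.slice cs (some ↑i) (some (↑(i + 5))) = pvFrac then
      pvLoopB cs sup close F (i + 5)
        (out ++ [if sup && pvNested cs close F i then pvFrac else pvDisp])
    else pvLoopB cs sup close F (i + 1) (out ++ [[cs.getD i ' ']])
  else out
termination_by cs.length - i
decreasing_by all_goals omega

def process_fracs_alt (text : String) (in_superscript : Bool) : String :=
  let cs := text.toList
  let close := (pvBuildClose cs).1
  let F := pvBuildF cs
  String.mk (PySem.Chars.join [] (pvLoopB cs in_superscript close F 0 []))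

-- ===== PRECONDITION & SPEC =====
def Spec_process_fracs (text : String) (in_superscript : Bool) (out : String) : Prop := out = process_fracs_alt text in_superscript
instance (text : String) (in_superscript : Bool) (out : String) : Decidable (Spec_process_fracs text in_superscript out) := by unfold Spec_process_fracs; infer_instance

-- ===== CLAIM (what is proved, stated in full; the proofs are below) =====
def Claim_equal_process_fracs : Prop := ∀ (text : String) (in_superscript : Bool), Dom_process_fracs text in_superscript → Spec_process_fracs text in_superscript (process_fracs text in_superscript)

-- ===== LEMMAS AND PROOFS =====

-- the closing-brace scan as a partial function: position where the count first hits 0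
def pvScanM (cs : List Char) (i : Nat) (bc : Nat) : Option Nat :=
  if h : i < cs.length then
    if cs.getD i ' ' = '{' then pvScanM cs (i + 1) (bc + 1)
    else if cs.getD i ' ' = '}' then
      if bc = 1 then some i else pvScanM cs (i + 1) (bc - 1)
    else pvScanM cs (i + 1) bc
  else none
termination_by cs.length - i

theorem pvScanM_bounds (cs : List Char) (i : Nat) (bc : Nat) (q : Nat)
    (h : pvScanM cs i bc = some q) : i ≤ q ∧ q < cs.length := by
  fun_induction pvScanM cs i bc generalizing q with
  | case1 i bc hlt hc ih => have := ih _ h; omega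
  | case2 i hlt hc hc2 => simp at h; omega
  | case3 i bc hlt hc hc2 hbc ih => have := ih _ h; omega
  | case4 i bc hlt hc hc2 ih => have := ih _ h; omega
  | case5 i bc hlt => simp at h

theorem pvScanA_eq (cs : List Char) (i : Nat) (bc : Nat) (hi : i ≤ cs.length) (hbc : 0 < bc) :
    pvScanA cs i (bc : Int) =
      (match pvScanM cs i bc with
       | some q => q + 1
       | none => cs.length) := by
  fun_induction pvScanM cs i bc with
  | case1 i bc hlt hc ih =>
    have h' : i < cs.length ∧ 0 < (bc : Int) := ⟨hlt, by exact_mod_cast hbc⟩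
    rw [pvScanA, dif_pos h', if_pos hc]
    have e : ((bc : Int) + 1) = ((bc + 1 : Nat) : Int) := by push_cast; ring
    rw [e]
    exact ih (by omega) (by omega)
  | case2 i hlt hc hc2 =>
    have h' : i < cs.length ∧ 0 < ((1 : Nat) : Int) := ⟨hlt, by norm_num⟩
    rw [pvScanA, dif_pos h', if_neg hc, if_pos hc2]
    norm_num
    rw [pvScanA, dif_neg (by norm_num)]
  | case3 i bc hlt hc hc2 hbc1 ih =>
    have h' : i < cs.length ∧ 0 < (bc : Int) := ⟨hlt, by exact_mod_cast hbc⟩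
    rw [pvScanA, dif_pos h', if_neg hc, if_pos hc2]
    have e : ((bc : Int) - 1) = ((bc - 1 : Nat) : Int) := by omega
    rw [e]
    exact ih (by omega) (by omega)
  | case4 i bc hlt hc hc2 ih =>
    have h' : i < cs.length ∧ 0 < (bc : Int) := ⟨hlt, by exact_mod_cast hbc⟩
    rw [pvScanA, dif_pos h', if_neg hc, if_neg hc2]
    exact ih (by omega) hbc
  | case5 i bc hlt =>
    rw [pvScanA, dif_neg (by omega)]
    simp; omega

-- the stack after reading cs[0..t)
def pvOpens (cs : List Char) : Nat → List Int
  | 0 => []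
  | t + 1 =>
    let o := pvOpens cs t
    if cs.getD t ' ' = '{' then o ++ [(t : Int)]
    else if cs.getD t ' ' = '}' ∧ o ≠ [] then o.dropLast
    else o

-- the dict after reading cs[0..t)
def pvDicts (cs : List Char) : Nat → PySem.Dict Int Int
  | 0 => PySem.Dict.empty
  | t + 1 =>
    let o := pvOpens cs t
    if cs.getD t ' ' = '{' then pvDicts cs t
    else if cs.getD t ' ' = '}' ∧ o ≠ [] then (pvDicts cs t).insert (o.getLastD 0) (t : Int)
    else pvDicts cs t

theorem pvBuildClose_aux (cs : List Char) : ∀ t, t ≤ cs.length →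
    ((PySem.List.enumerate (cs.drop t) ↑t).foldl
      (fun st pc =>
        if pc.2 = '{' then (st.1, st.2 ++ [pc.1])
        else if pc.2 = '}' ∧ st.2 ≠ [] then (st.1.insert (st.2.getLastD 0) pc.1, st.2.dropLast)
        else st)
      (pvDicts cs t, pvOpens cs t)) = (pvDicts cs cs.length, pvOpens cs cs.length) := by
  intro t ht
  induction ht' : cs.length - t generalizing t with
  | zero =>
    have : t = cs.length := by omega
    subst this
    simp [List.drop_length, PySem.List.enumerate_nil]
  | succ k ih =>
    have hlt : t < cs.length := by omega
    have hd : cs.drop t = cs[t] :: cs.drop (t + 1) := List.drop_eq_getElem_cons hlt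
    rw [hd, PySem.List.enumerate_cons, List.foldl_cons]
    have hg : cs.getD t ' ' = cs[t] := by simp [List.getD_eq_getElem?_getD, hlt]
    have step :
        (if cs[t] = '{' then ((pvDicts cs t, pvOpens cs t).1, (pvDicts cs t, pvOpens cs t).2 ++ [(t:Int)])
         else if cs[t] = '}' ∧ (pvDicts cs t, pvOpens cs t).2 ≠ [] then
           ((pvDicts cs t, pvOpens cs t).1.insert ((pvDicts cs t, pvOpens cs t).2.getLastD 0) (t:Int),
            (pvDicts cs t, pvOpens cs t).2.dropLast)
         else (pvDicts cs t, pvOpens cs t)) = (pvDicts cs (t+1), pvOpens cs (t+1)) := by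
      simp only [pvDicts, pvOpens, hg]
      by_cases h1 : cs[t] = '{'
      · simp [h1]
      · by_cases h2 : cs[t] = '}' ∧ pvOpens cs t ≠ []
        · simp [h1, h2]
        · simp [h1, h2]
    rw [step, show ((t : Int) + 1) = ((t + 1 : Nat) : Int) by push_cast; ring]
    exact ih (t + 1) (by omega) (by omega)

theorem pvBuildClose_eq (cs : List Char) :
    pvBuildClose cs = (pvDicts cs cs.length, pvOpens cs cs.length) := by
  have h := pvBuildClose_aux cs 0 (by omega)
  simpa [pvBuildClose, pvDicts, pvOpens] using h

-- number of stack entries ≥ p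
def pvKOf (o : List Int) (p : Int) : Nat := o.countP (fun q => decide (p ≤ q))

def pvInvariant (cs : List Char) (t : Nat) : Prop :=
  ((pvOpens cs t).Pairwise (· < ·)) ∧
  (∀ p ∈ pvOpens cs t, 0 ≤ p ∧ p < (t : Int) ∧ cs.getD p.toNat ' ' = '{') ∧
  (∀ p ∈ pvOpens cs t, pvScanM cs (p.toNat + 1) 1 = pvScanM cs t (pvKOf (pvOpens cs t) p)) ∧
  (∀ p ∈ pvOpens cs t, (pvDicts cs t).get? p = none) ∧
  (∀ p : Nat, p < t → cs.getD p ' ' = '{' → (p : Int) ∉ pvOpens cs t →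
      ∃ q : Nat, q < t ∧ pvScanM cs (p + 1) 1 = some q ∧ (pvDicts cs t).get? ↑p = some ↑q) ∧
  (∀ (p q : Int), (pvDicts cs t).get? p = some q → 0 ≤ p ∧ p < (t : Int) ∧ cs.getD p.toNat ' ' = '{')

theorem pvInvariant_holds (cs : List Char) : ∀ t, t ≤ cs.length → pvInvariant cs t := by
  intro t
  induction t with
  | zero =>
    intro _
    refine ⟨by simp [pvOpens], by simp [pvOpens], by simp [pvOpens], by simp [pvOpens, pvDicts], ?_, ?_⟩
    · intro p hp; omega
    · intro p q h; rw [pvDicts, PySem.Dict.get?_empty] at h; simp at h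
  | succ t ih =>
    intro ht
    have hlt : t < cs.length := by omega
    obtain ⟨ia, ib, ic, id, ie, if'⟩ := ih (by omega)
    set o := pvOpens cs t with ho
    by_cases h1 : cs.getD t ' ' = '{'
    · -- push t
      have hop : pvOpens cs (t+1) = o ++ [(t:Int)] := by rw [pvOpens, if_pos h1]
      have hdp : pvDicts cs (t+1) = pvDicts cs t := by rw [pvDicts, if_pos h1]
      have hall : ∀ p ∈ o, p < (t:Int) := fun p hp => (ib p hp).2.1
      refine ⟨?_, ?_, ?_, ?_, ?_, ?_⟩
      · rw [hop, List.pairwise_append]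
        exact ⟨ia, by simp, by intro a ha b hb; simp at hb; subst hb; exact hall a ha⟩
      · rw [hop]; intro p hp
        rcases List.mem_append.1 hp with h | h
        · obtain ⟨x, y, z⟩ := ib p h; exact ⟨x, by push_cast; omega, z⟩
        · simp at h; subst h; exact ⟨by positivity, by push_cast; omega, by simpa using h1⟩
      · rw [hop]; intro p hp
        rcases List.mem_append.1 hp with h | h
        · have hk : pvKOf (o ++ [(t:Int)]) p = pvKOf o p + 1 := by
            have : p ≤ (t:Int) := le_of_lt (hall p h)
            simp [pvKOf, List.countP_append, this]
          rw [hk, ic p h]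
          conv_lhs => rw [pvScanM, dif_pos hlt, if_pos h1]
        · simp at h; subst h
          have hk : pvKOf (o ++ [(t:Int)]) (t:Int) = 1 := by
            have hz : o.countP (fun q => decide ((t:Int) ≤ q)) = 0 :=
              List.countP_eq_zero.2 (fun q hq => by have := hall q hq; simp; omega)
            simp [pvKOf, List.countP_append, hz]
          rw [hk]; simp
      · rw [hop, hdp]; intro p hp
        rcases List.mem_append.1 hp with h | h
        · exact id p h
        · simp at h; subst h
          cases hg : (pvDicts cs t).get? (t:Int) with
          | none => rfl
          | some q => have := (if' _ _ hg).2.1; omega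
      · rw [hop, hdp]; intro p hp hc hmem
        have hne : p ≠ t := by
          intro he; subst he; exact hmem (by simp)
        obtain ⟨q, hq1, hq2, hq3⟩ := ie p (by omega) hc (fun hx => hmem (by simp [hx]))
        exact ⟨q, by omega, hq2, hq3⟩
      · rw [hdp]; intro p q h
        obtain ⟨x, y, z⟩ := if' p q h; exact ⟨x, by push_cast; omega, z⟩
    · by_cases h2 : cs.getD t ' ' = '}' ∧ o ≠ []
      · -- pop
        obtain ⟨hcc, hne⟩ := h2
        have hdec : o = o.dropLast ++ [o.getLast hne] := (List.dropLast_append_getLast hne).symm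
        set m := o.getLast hne with hm
        have hmo : m ∈ o := List.getLast_mem hne
        have hglast : o.getLastD 0 = m := by
          rw [List.getLastD_eq_getLast?, List.getLast?_eq_some_getLast hne]; rfl
        have hop : pvOpens cs (t+1) = o.dropLast := by
          rw [pvOpens, if_neg h1, if_pos ⟨hcc, hne⟩]
        have hdp : pvDicts cs (t+1) = (pvDicts cs t).insert m (t:Int) := by
          rw [pvDicts, if_neg h1, if_pos ⟨hcc, hne⟩, hglast]
        have hdl : ∀ p ∈ o.dropLast, p < m := by
          intro p hp
          have := ia
          rw [hdec, List.pairwise_append] at this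
          exact this.2.2 p hp m (by simp)
        have hmfacts := ib m hmo
        have hkm : pvKOf o m = 1 := by
          conv_lhs => rw [hdec]
          have hz : o.dropLast.countP (fun q => decide (m ≤ q)) = 0 :=
            List.countP_eq_zero.2 (fun q hq => by have := hdl q hq; simp; omega)
          simp [pvKOf, List.countP_append, hz]
        have hscanm : pvScanM cs (m.toNat + 1) 1 = some t := by
          rw [ic m hmo, hkm, pvScanM, dif_pos hlt, if_neg h1, if_pos hcc, if_pos rfl]
        refine ⟨?_, ?_, ?_, ?_, ?_, ?_⟩
        · rw [hop]; exact ia.sublist (List.dropLast_sublist o)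
        · rw [hop]; intro p hp
          have hpo : p ∈ o := List.mem_of_mem_dropLast hp
          obtain ⟨x, y, z⟩ := ib p hpo; exact ⟨x, by push_cast; omega, z⟩
        · rw [hop]; intro p hp
          have hpo : p ∈ o := List.mem_of_mem_dropLast hp
          have hplt : p < m := hdl p hp
          have hk1 : 1 ≤ pvKOf o.dropLast p := by
            have : 0 < o.dropLast.countP (fun q => decide (p ≤ q)) := by
              rw [List.countP_pos_iff]
              exact ⟨p, hp, by simp⟩
            simpa [pvKOf] using this
          have hko : pvKOf o p = pvKOf o.dropLast p + 1 := by
            conv_lhs => rw [hdec]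
            simp [pvKOf, List.countP_append, le_of_lt hplt]
          rw [ic p hpo, hko]
          conv_lhs => rw [pvScanM, dif_pos hlt, if_neg h1, if_pos hcc, if_neg (by omega)]
          norm_num
        · rw [hop, hdp]; intro p hp
          have hpo : p ∈ o := List.mem_of_mem_dropLast hp
          have hpne : p ≠ m := by have := hdl p hp; omega
          rw [PySem.Dict.get?_insert_of_ne _ _ hpne]
          exact id p hpo
        · rw [hop, hdp]; intro p hp hc hmem
          by_cases hpm : (p : Int) = m
          · refine ⟨t, by omega, ?_, ?_⟩
            · have : p = m.toNat := by omega
              rw [this]; exact hscanm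
            · rw [hpm, PySem.Dict.get?_insert_self]
          · have hpno : (p:Int) ∉ o := by
              intro hx
              rw [hdec] at hx
              rcases List.mem_append.1 hx with h | h
              · exact hmem h
              · simp at h; exact hpm h
            have hpt : p ≠ t := by
              intro he; subst he; exact h1 hc
            obtain ⟨q, hq1, hq2, hq3⟩ := ie p (by omega) hc hpno
            exact ⟨q, by omega, hq2, by rw [PySem.Dict.get?_insert_of_ne _ _ hpm]; exact hq3⟩
        · rw [hdp]; intro p q h
          by_cases hpm : p = m
          · subst hpm
            exact ⟨hmfacts.1, by have := hmfacts.2.1; push_cast; omega, hmfacts.2.2⟩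
          · rw [PySem.Dict.get?_insert_of_ne _ _ hpm] at h
            obtain ⟨x, y, z⟩ := if' p q h
            exact ⟨x, by push_cast; omega, z⟩
      · -- no-op
        have hop : pvOpens cs (t+1) = o := by rw [pvOpens, if_neg h1, if_neg h2]
        have hdp : pvDicts cs (t+1) = pvDicts cs t := by rw [pvDicts, if_neg h1, if_neg h2]
        refine ⟨?_, ?_, ?_, ?_, ?_, ?_⟩
        · rw [hop]; exact ia
        · rw [hop]; intro p hp
          obtain ⟨x, y, z⟩ := ib p hp; exact ⟨x, by push_cast; omega, z⟩
        · rw [hop]; intro p hp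
          have hne : o ≠ [] := by intro he; rw [he] at hp; simp at hp
          have hcc : ¬ cs.getD t ' ' = '}' := fun hx => h2 ⟨hx, hne⟩
          rw [ic p hp]
          conv_lhs => rw [pvScanM, dif_pos hlt, if_neg h1, if_neg hcc]
        · rw [hop, hdp]; exact id
        · rw [hop, hdp]; intro p hp hc hmem
          have hpt : p ≠ t := by intro he; subst he; exact h1 hc
          obtain ⟨q, hq1, hq2, hq3⟩ := ie p (by omega) hc hmem
          exact ⟨q, by omega, hq2, hq3⟩
        · rw [hdp]; intro p q h
          obtain ⟨x, y, z⟩ := if' p q h; exact ⟨x, by push_cast; omega, z⟩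

theorem pvScanM_none_of_ge (cs : List Char) (i bc : Nat) (h : cs.length ≤ i) :
    pvScanM cs i bc = none := by
  rw [pvScanM, dif_neg (by omega)]

theorem pvClose_eq_scan (cs : List Char) (p : Nat) (hp : p < cs.length)
    (hc : cs.getD p ' ' = '{') :
    (pvDicts cs cs.length).get? ↑p = (pvScanM cs (p + 1) 1).map (fun q => (q : Int)) := by
  obtain ⟨ia, ib, ic, id, ie, if'⟩ := pvInvariant_holds cs cs.length le_rfl
  by_cases hmem : (p : Int) ∈ pvOpens cs cs.length
  · have h1 := ic _ hmem
    rw [pvScanM_none_of_ge cs cs.length _ le_rfl] at h1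
    rw [id _ hmem]
    simp at h1
    rw [h1]; rfl
  · obtain ⟨q, hq1, hq2, hq3⟩ := ie p hp hc hmem
    rw [hq3, hq2]; rfl

-- counting side
def pvIsFrac (cs : List Char) (p : Nat) : Bool :=
  decide (PySem.List.slice cs (some ↑p) (some (↑(p + 5))) = pvFrac)

def pvCnt (cs : List Char) (m : Nat) : Nat := (List.range m).countP (pvIsFrac cs)

theorem pvBuildF_aux (cs : List Char) : ∀ k,
    (List.range k).foldl
      (fun (F : List Int) (p : Nat) =>
        F ++ [F.getD p 0 + (if PySem.List.slice cs (some ↑p) (some (↑(p + 5))) = pvFrac then 1 else 0)])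
      [0] = (List.range (k + 1)).map (fun p => (pvCnt cs p : Int)) := by
  intro k
  induction k with
  | zero => simp [pvCnt]
  | succ k ih =>
    rw [List.range_succ, List.foldl_append, ih, List.foldl_cons, List.foldl_nil]
    rw [List.range_succ (n := k + 1), List.map_append]
    congr 1
    have hg : ((List.range (k + 1)).map (fun p => (pvCnt cs p : Int))).getD k 0 = (pvCnt cs k : Int) := by
      rw [List.getD_eq_getElem?_getD]
      simp
    rw [hg]
    have : pvCnt cs (k + 1) = pvCnt cs k + (if pvIsFrac cs k = true then 1 else 0) := by
      simp [pvCnt, List.range_succ, List.countP_append, List.countP_cons]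
    simp only [List.map_cons, List.map_nil, this, pvIsFrac]
    push_cast
    split_ifs with h h2 h3 <;> simp_all

theorem pvBuildF_eq (cs : List Char) :
    pvBuildF cs = (List.range (cs.length + 1)).map (fun p => (pvCnt cs p : Int)) :=
  pvBuildF_aux cs cs.length

theorem pvIsFrac_iff (cs : List Char) (p : Nat) :
    pvIsFrac cs p = true ↔ pvFrac <+: cs.drop p := by
  rw [pvIsFrac, decide_eq_true_iff, PySem.List.slice_natCast,
    show p + 5 - p = 5 from by omega]
  constructor
  · intro h
    rw [List.prefix_iff_eq_take, show pvFrac.length = 5 from rfl]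
    exact h.symm
  · intro h
    have := List.prefix_iff_eq_take.1 h
    rw [show pvFrac.length = 5 from rfl] at this
    exact this.symm

theorem pvCnt_step (cs : List Char) (m : Nat) :
    pvCnt cs (m + 1) = pvCnt cs m + (if pvIsFrac cs m = true then 1 else 0) := by
  simp [pvCnt, List.range_succ, List.countP_append, List.countP_cons]

theorem pvCnt_mono (cs : List Char) (a : Nat) : ∀ m, a ≤ m → pvCnt cs a ≤ pvCnt cs m := by
  intro m
  induction m with
  | zero => intro h; simp [Nat.le_zero.mp h]
  | succ m ih =>
    intro h
    by_cases ham : a = m + 1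
    · rw [ham]
    · have := ih (by omega)
      rw [pvCnt_step]
      split_ifs <;> omega

theorem pvCnt_lt_iff (cs : List Char) (a m : Nat) (h : a ≤ m) :
    pvCnt cs a < pvCnt cs m ↔ ∃ p, a ≤ p ∧ p < m ∧ pvIsFrac cs p = true := by
  induction m with
  | zero =>
    have ha : a = 0 := by omega
    subst ha
    constructor
    · intro hlt; exact absurd hlt (lt_irrefl _)
    · rintro ⟨p, _, hp, _⟩; omega
  | succ m ih =>
    by_cases ham : a = m + 1
    · subst ham
      rw [pvCnt_step]
      constructor
      · intro h2
        exfalso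
        omega
      · rintro ⟨p, h1, h2, _⟩; omega
    · have ham' : a ≤ m := by omega
      have hmono := pvCnt_mono cs a m ham'
      rw [pvCnt_step]
      constructor
      · intro hlt
        by_cases hf : pvIsFrac cs m = true
        · by_cases h2 : pvCnt cs a < pvCnt cs m
          · obtain ⟨p, h3, h4, h5⟩ := (ih ham').1 h2
            exact ⟨p, h3, by omega, h5⟩
          · exact ⟨m, by omega, by omega, hf⟩
        · simp [hf] at hlt
          obtain ⟨p, h3, h4, h5⟩ := (ih ham').1 hlt
          exact ⟨p, h3, by omega, h5⟩
      · rintro ⟨p, h1, h2, h3⟩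
        by_cases hpm : p = m
        · subst hpm
          simp [h3]
          omega
        · have : pvCnt cs a < pvCnt cs m := (ih ham').2 ⟨p, h1, by omega, h3⟩
          split_ifs <;> omega

theorem pvOccIn_eq (cs : List Char) (a b : Nat) (ha : a ≤ cs.length) (hb : b ≤ cs.length) :
    pvOccIn (pvBuildF cs) a b = PySem.Chars.isIn pvFrac (List.take (b - a) (List.drop a cs)) := by
  have hF := pvBuildF_eq cs
  have hga : (pvBuildF cs).getD a 0 = (pvCnt cs a : Int) := by
    rw [hF]; exact PySem.List.getD_map_range _ _ _ _ (by omega)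
  have hgb : (pvBuildF cs).getD (b - 4) 0 = (pvCnt cs (b - 4) : Int) := by
    rw [hF]; exact PySem.List.getD_map_range _ _ _ _ (by omega)
  rw [pvOccIn, hga, hgb, Bool.eq_iff_iff, decide_eq_true_iff,
    ← PySem.Chars.exists_prefix_drop_iff_isIn]
  constructor
  · rintro ⟨h1, h2⟩
    have h3 : pvCnt cs a < pvCnt cs (b - 4) := by omega
    obtain ⟨p, hp1, hp2, hp3⟩ := (pvCnt_lt_iff cs a (b - 4) (by omega)).1 h3
    have hpre := (pvIsFrac_iff cs p).1 hp3
    refine ⟨p - a, ?_⟩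
    rw [List.drop_take, List.drop_drop, List.prefix_take_iff,
      show a + (p - a) = p from by omega]
    refine ⟨hpre, ?_⟩
    rw [show pvFrac.length = 5 from rfl]
    omega
  · rintro ⟨j, hj⟩
    rw [List.drop_take, List.drop_drop, List.prefix_take_iff] at hj
    obtain ⟨hj1, hj2⟩ := hj
    rw [show pvFrac.length = 5 from rfl] at hj2
    have hfr : pvIsFrac cs (a + j) = true := (pvIsFrac_iff _ _).2 hj1
    have hlt : a + j < b - 4 := by omega
    refine ⟨by omega, ?_⟩
    have := (pvCnt_lt_iff cs a (b - 4) (by omega)).2 ⟨a + j, by omega, hlt, hfr⟩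
    omega

theorem pvNested_eq (cs : List Char) (i : Nat) :
    pvNested cs (pvBuildClose cs).1 (pvBuildF cs) i = pvHasNested cs i := by
  rw [pvBuildClose_eq]
  simp only [pvNested, pvHasNested]
  by_cases h1 : i + 5 < cs.length ∧ cs.getD (i + 5) ' ' = '{'
  · rw [if_pos h1, if_pos h1]
    have hA1 : pvScanA cs (i + 5 + 1) 1 =
        (match pvScanM cs (i + 5 + 1) 1 with | some q => q + 1 | none => cs.length) := by
      have h := pvScanA_eq cs (i + 5 + 1) 1 (by omega) (by norm_num)
      simpa using h
    have hclose1 := pvClose_eq_scan cs (i + 5) h1.1 h1.2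
    rw [hA1, hclose1]
    cases hscan : pvScanM cs (i + 5 + 1) 1 with
    | none =>
      simp
    | some q =>
      have hqb := pvScanM_bounds _ _ _ _ hscan
      simp only [Option.pure_def, Option.bind_eq_bind, Option.bind_some, Option.map_some, Int.toNat_natCast]
      by_cases h2 : q + 1 < cs.length ∧ cs.getD (q + 1) ' ' = '{'
      · rw [if_pos h2, if_pos h2]
        have hA2 : pvScanA cs (q + 1 + 1) 1 =
            (match pvScanM cs (q + 1 + 1) 1 with | some k => k + 1 | none => cs.length) := by
          have h := pvScanA_eq cs (q + 1 + 1) 1 (by omega) (by norm_num)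
          simpa using h
        have hclose2 := pvClose_eq_scan cs (q + 1) h2.1 h2.2
        rw [hA2, hclose2]
        cases hscan2 : pvScanM cs (q + 1 + 1) 1 with
        | none =>
          simp only [Option.pure_def, Option.bind_eq_bind, Option.bind_none, Option.map_none]
          rw [PySem.List.slice_natCast, PySem.List.slice_natCast,
            pvOccIn_eq cs (i + 6) (q + 1) (by omega) (by omega),
            pvOccIn_eq cs (q + 2) (cs.length - 1) (by omega) (by omega)]
        | some k =>
          have hkb := pvScanM_bounds _ _ _ _ hscan2
          simp only [Option.pure_def, Option.bind_eq_bind, Option.bind_some, Option.map_some, Int.toNat_natCast]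
          rw [PySem.List.slice_natCast, PySem.List.slice_natCast,
            pvOccIn_eq cs (i + 6) (q + 1) (by omega) (by omega),
            pvOccIn_eq cs (q + 2) (k + 1 - 1) (by omega) (by omega)]
      · rw [if_neg h2, if_neg (by omega)]
  · rw [if_neg h1, if_neg h1]

theorem pvSliceFrac_len (cs : List Char) (i : Nat)
    (h : PySem.List.slice cs (some ↑i) (some (↑(i + 5))) = pvFrac) : i + 4 < cs.length := by
  rw [PySem.List.slice_natCast] at h
  have := congrArg List.length h
  simp [show i + 5 - i = 5 from by omega, pvFrac] at this
  omega

theorem pvLoop_eq (cs : List Char) (sup : Bool) :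
    ∀ i acc, pvLoopB cs sup (pvBuildClose cs).1 (pvBuildF cs) i acc = pvLoopA cs sup i acc := by
  intro i acc
  fun_induction pvLoopA cs sup i acc with
  | case1 i acc hlt hcond hsup hnest ih =>
    rw [pvLoopB, dif_pos hlt, if_pos hcond.2, pvNested_eq]
    simpa [hsup, hnest] using ih
  | case2 i acc hlt hcond hsup hnest ih =>
    rw [Bool.not_eq_true] at hnest
    rw [pvLoopB, dif_pos hlt, if_pos hcond.2, pvNested_eq]
    simpa [hsup, hnest] using ih
  | case3 i acc hlt hcond hsup ih =>
    rw [Bool.not_eq_true] at hsup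
    rw [pvLoopB, dif_pos hlt, if_pos hcond.2]
    simpa [hsup] using ih
  | case4 i acc hlt hcond ih =>
    have hsl : ¬ PySem.List.slice cs (some ↑i) (some (↑(i + 5))) = pvFrac := by
      intro hx
      exact hcond ⟨pvSliceFrac_len cs i hx, hx⟩
    rw [pvLoopB, dif_pos hlt, if_neg hsl, ih]
  | case5 i acc hlt =>
    rw [pvLoopB, dif_neg hlt]

-- ===== VERDICT (by name: the statement is the Claim_ definition above) =====
theorem process_fracs_spec : Claim_equal_process_fracs := by
  intro text sup _
  show _ = _
  simp only [process_fracs, process_fracs_alt]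
  rw [pvLoop_eq]
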